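-- pv_equiv track=rewrite | github.com/RPA-Maximo/scania_rpa | rpa/po_vendor_scraper.py | build_po_maps
-- ===== SOURCE A (Python) =====
-- from typing import Dict, List, Optional, Any
--
-- def build_po_maps(po_list: list) -> tuple:
--     """
--     从 po_list 构建 {vendor_code: po_number} 和 {billto_code: po_number} 映射。
--     每个公司代码只取第一张遇到的 PO 作为代表。
--
--     Returns:
--         (vendor_po_map, billto_po_map)
--     """
--     vendor_po_map: Dict[str, str] = {}
--     billto_po_map: Dict[str, str] = {}
--     for po in po_list:
--         po_num = po.get('ponum', '')
--         if not po_num: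
--             continue
--         vendor = po.get('vendor')
--         billto = po.get('billto')
--         if vendor and vendor not in vendor_po_map:
--             vendor_po_map[vendor] = po_num
--         if billto and billto not in billto_po_map:
--             billto_po_map[billto] = po_num
--     return vendor_po_map, billto_po_map
-- ===== SOURCE B (Python) =====
-- def _first_po_map(po_list, field):
--     m = {}
--     for po in po_list:
--         ponum = po.get('ponum', '')
--         key = po.get(field)
--         if ponum and key:
--             m.setdefault(key, ponum)
--     return m
--
--
-- def build_po_maps(po_list: list) -> tuple:
--     return _first_po_map(po_list, 'vendor'), _first_po_map(po_list, 'billto')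
-- ===== Notes on version B (the rewrite author's own statement) =====
-- stated objective: simpler
-- what changed: Replaces A's single interleaved loop with continue/membership guards by a shared helper that builds each first-wins map in its own pass using dict.setdefault.
import Mathlib
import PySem

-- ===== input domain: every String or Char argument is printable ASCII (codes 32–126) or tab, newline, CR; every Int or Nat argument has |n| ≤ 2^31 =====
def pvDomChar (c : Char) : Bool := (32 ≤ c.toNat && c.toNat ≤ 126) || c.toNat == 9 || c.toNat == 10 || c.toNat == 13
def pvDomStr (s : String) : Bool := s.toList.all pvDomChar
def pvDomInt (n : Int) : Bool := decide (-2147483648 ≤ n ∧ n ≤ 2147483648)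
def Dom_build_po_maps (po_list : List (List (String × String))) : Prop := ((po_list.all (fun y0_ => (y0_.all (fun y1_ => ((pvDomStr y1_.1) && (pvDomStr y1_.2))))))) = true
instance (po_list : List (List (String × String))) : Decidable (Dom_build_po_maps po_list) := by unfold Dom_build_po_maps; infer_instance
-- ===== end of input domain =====

-- B replaces A's single interleaved loop (continue + membership guards) by a shared
-- one-field helper run once per map using setdefault: simpler decomposition, same cost.


-- ===== PORT A =====
-- one iteration of A's loop over the pair of maps (continue = return the state unchanged)
def aStep (st : PySem.Dict String String × PySem.Dict String String)
    (po : List (String × String)) :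
    PySem.Dict String String × PySem.Dict String String :=
  let p := PySem.Dict.mk po
  let po_num := p.getD "ponum" ""
  if po_num = "" then st
  else
    let vendor := p.get? "vendor"
    let billto := p.get? "billto"
    let vm := match vendor with
      | some v => if v ≠ "" ∧ st.1.contains v = false then st.1.insert v po_num else st.1
      | none => st.1
    let bm := match billto with
      | some b => if b ≠ "" ∧ st.2.contains b = false then st.2.insert b po_num else st.2
      | none => st.2
    (vm, bm)

def build_po_maps (po_list : List (List (String × String))) : (List (String × String)) × (List (String × String)) :=
  let st := po_list.foldl aStep (PySem.Dict.empty, PySem.Dict.empty)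
  (st.1.items, st.2.items)

-- ===== PORT B =====
-- _first_po_map: first-wins map for one field, built with setdefault
def firstPoMap (po_list : List (List (String × String))) (field : String) :
    PySem.Dict String String :=
  po_list.foldl (fun m po =>
    let p := PySem.Dict.mk po
    let ponum := p.getD "ponum" ""
    match p.get? field with
    | some key => if ponum ≠ "" ∧ key ≠ "" then m.setdefault key ponum else m
    | none => m) PySem.Dict.empty

def build_po_maps_alt (po_list : List (List (String × String))) : (List (String × String)) × (List (String × String)) :=
  ((firstPoMap po_list "vendor").items, (firstPoMap po_list "billto").items)

-- ===== PRECONDITION & SPEC =====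
def Spec_build_po_maps (po_list : List (List (String × String))) (out : (List (String × String)) × (List (String × String))) : Prop := out = build_po_maps_alt po_list
instance (po_list : List (List (String × String))) (out : (List (String × String)) × (List (String × String))) : Decidable (Spec_build_po_maps po_list out) := by unfold Spec_build_po_maps; infer_instance

-- ===== CLAIM (what is proved, stated in full; the proofs are below) =====
def Claim_equal_build_po_maps : Prop := ∀ (po_list : List (List (String × String))), Dom_build_po_maps po_list → Spec_build_po_maps po_list (build_po_maps po_list)

-- ===== LEMMAS AND PROOFS =====

-- B's loop body, named for the proofs
def bStep (field : String) (m : PySem.Dict String String) (po : List (String × String)) :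
    PySem.Dict String String :=
  let p := PySem.Dict.mk po
  let ponum := p.getD "ponum" ""
  match p.get? field with
  | some key => if ponum ≠ "" ∧ key ≠ "" then m.setdefault key ponum else m
  | none => m

theorem firstPoMap_eq_foldl (po_list : List (List (String × String))) (field : String) :
    firstPoMap po_list field = po_list.foldl (bStep field) PySem.Dict.empty := rfl

-- for nonempty po_num, A's guarded insert equals B's guarded setdefault
theorem setdefault_guard (m : PySem.Dict String String) (k v : String) :
    (if ¬k = "" ∧ m.contains k = false then m.insert k v else m)
      = (if ¬k = "" then m.setdefault k v else m) := by
  by_cases hk : k = ""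
  · simp [hk]
  · by_cases hc : m.contains k = true
    · simp [hk, hc, PySem.Dict.setdefault_of_contains]
    · simp only [Bool.not_eq_true] at hc
      simp [hk, hc, PySem.Dict.setdefault_of_not_contains]

-- one A step equals one B step on each component
theorem aStep_eq (st : PySem.Dict String String × PySem.Dict String String)
    (po : List (String × String)) :
    aStep st po = (bStep "vendor" st.1 po, bStep "billto" st.2 po) := by
  unfold aStep bStep
  by_cases hp : (PySem.Dict.mk po).getD "ponum" "" = ""
  · simp only [hp, ne_eq, not_true_eq_false, false_and, if_true, if_false]
    cases (PySem.Dict.mk po).get? "vendor" <;> cases (PySem.Dict.mk po).get? "billto" <;> simp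
  · simp only [hp, ne_eq, not_false_eq_true, true_and, if_false]
    cases (PySem.Dict.mk po).get? "vendor" <;> cases (PySem.Dict.mk po).get? "billto" <;>
      simp [setdefault_guard]

-- the paired fold splits into the two independent folds
theorem foldl_pair (l : List (List (String × String)))
    (vm bm : PySem.Dict String String) :
    l.foldl aStep (vm, bm) = (l.foldl (bStep "vendor") vm, l.foldl (bStep "billto") bm) := by
  induction l generalizing vm bm with
  | nil => rfl
  | cons po rest ih =>
      simp only [List.foldl_cons, aStep_eq]
      exact ih _ _

-- ===== VERDICT (by name: the statement is the Claim_ definition above) =====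
theorem build_po_maps_spec : Claim_equal_build_po_maps := by
  intro po_list _
  unfold Spec_build_po_maps build_po_maps build_po_maps_alt
  rw [firstPoMap_eq_foldl, firstPoMap_eq_foldl, foldl_pair]
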